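-- pv_equiv track=rewrite | github.com/Aluriak/syne | syne/utils.py | right_left_walk
-- ===== SOURCE A (Python) =====
-- def right_left_walk(size:int) -> [int]:
--     """Yield index of objects to visit for a right left walk
--
--     >>> tuple(right_left_walk(5))
--     (2, 3, 1, 4, 0)
--
--     """
--     middle = size // 2
--     yield middle
--     low, up = middle-1, middle+1
--     change = True
--     while change:
--         change = False
--         if up < size:
--             yield up
--             up += 1
--             change = True
--         if low >= 0:
--             yield low
--             low -= 1
--             change = True
-- ===== SOURCE B (Python) =====
-- def right_left_walk(size: int):
--     middle = size // 2
--     yield middle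
--     others = [i for i in range(size) if i != middle]
--     yield from sorted(others, key=lambda i: 2 * abs(i - middle) - (i > middle))
-- ===== Notes on version B (the rewrite author's own statement) =====
-- stated objective: alternative
-- what changed: Replaces A's stateful two-cursor while-loop (low/up pointers with a change flag) by a global sort: after the unconditional middle, the remaining indices are sorted by a closed-form walk-rank key (twice the distance from the middle, minus one for indices right of it), which ranks the right neighbour at each distance just before the left one.
import Mathlib
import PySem

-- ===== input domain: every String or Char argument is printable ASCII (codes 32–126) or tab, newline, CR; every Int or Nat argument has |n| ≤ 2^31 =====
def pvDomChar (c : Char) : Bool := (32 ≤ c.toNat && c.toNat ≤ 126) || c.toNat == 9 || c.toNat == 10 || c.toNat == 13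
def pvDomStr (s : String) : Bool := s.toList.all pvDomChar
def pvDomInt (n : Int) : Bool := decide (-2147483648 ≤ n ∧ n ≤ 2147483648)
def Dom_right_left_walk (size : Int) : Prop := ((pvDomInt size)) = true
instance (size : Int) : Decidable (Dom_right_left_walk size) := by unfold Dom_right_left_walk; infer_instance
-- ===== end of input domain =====

-- B replaces A's stateful two-cursor while-loop by a global sort of the non-middle
-- indices under a closed-form walk-rank key (twice the distance from the middle, minus one right of it);
-- objective: alternative algorithm, same observable result.

-- ===== PORT A =====
-- the while-loop of A: state (low, up), one iteration per recursive call;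
-- `change` is true iff at least one of the two ifs fired, i.e. up < size ∨ 0 ≤ low
def walkA (size low up : Int) : List Int :=
  if up < size ∨ 0 ≤ low then
    ((if up < size then [up] else []) ++ (if 0 ≤ low then [low] else [])) ++
      walkA size (if 0 ≤ low then low - 1 else low) (if up < size then up + 1 else up)
  else []
termination_by ((size - up).toNat + (low + 1).toNat)
decreasing_by split_ifs <;> omega

def right_left_walk (size : Int) : List Int :=
  let middle := PySem.Int.floordiv size 2
  middle :: walkA size (middle - 1) (middle + 1)

-- ===== PORT B =====
def right_left_walk_alt (size : Int) : List Int :=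
  let middle := PySem.Int.floordiv size 2
  let others := (PySem.List.pyRange 0 size 1).filter (fun i => i != middle)
  middle :: PySem.List.sorted others
    (fun i => 2 * |i - middle| - (if middle < i then 1 else 0)) false

-- ===== PRECONDITION & SPEC =====
def Spec_right_left_walk (size : Int) (out : List Int) : Prop := out = right_left_walk_alt size
instance (size : Int) (out : List Int) : Decidable (Spec_right_left_walk size out) := by unfold Spec_right_left_walk; infer_instance

-- ===== CLAIM (what is proved, stated in full; the proofs are below) =====
def Claim_equal_right_left_walk : Prop := ∀ (size : Int), Dom_right_left_walk size → Spec_right_left_walk size (right_left_walk size)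

-- ===== LEMMAS AND PROOFS =====

-- proof-side helper: the order in which A's loop emits indices (right element first per step)
def interleave : List Int → List Int → List Int
  | [], ys => ys
  | x :: xs, [] => x :: xs
  | x :: xs, y :: ys => x :: y :: interleave xs ys

-- B's sort key, abbreviated for the lemmas
def wkey (m i : Int) : Int := 2 * |i - m| - (if m < i then 1 else 0)

theorem interleave_nil_right (xs : List Int) : interleave xs [] = xs := by
  cases xs <;> rfl

theorem mem_interleave (xs ys : List Int) (z : Int) :
    z ∈ interleave xs ys ↔ z ∈ xs ∨ z ∈ ys := by
  induction xs generalizing ys with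
  | nil => simp [interleave]
  | cons x xs ih =>
    cases ys with
    | nil => simp [interleave]
    | cons y ys => simp [interleave, ih]; tauto

theorem interleave_perm_append (xs ys : List Int) :
    (interleave xs ys).Perm (xs ++ ys) := by
  induction xs generalizing ys with
  | nil => simp [interleave]
  | cons x xs ih =>
    cases ys with
    | nil => simp [interleave]
    | cons y ys =>
      simp only [interleave, List.cons_append]
      exact List.Perm.cons x (((ih ys).cons y).trans List.perm_middle.symm)

theorem walkA_eq (size low up : Int) :
    walkA size low up
      = interleave (PySem.List.pyRange up size 1) (PySem.List.pyRange low (-1) (-1)) := by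
  rw [walkA]
  by_cases hu : up < size <;> by_cases hl : (0:Int) ≤ low
  · simp only [hu, hl, if_pos, or_true]
    rw [PySem.List.pyRange_one_cons hu, PySem.List.pyRange_neg_one_cons (by omega : (-1:Int) < low)]
    simp [interleave, walkA_eq size (low - 1) (up + 1)]
  · simp only [hu, hl, true_or, if_true, if_false]
    rw [PySem.List.pyRange_one_cons hu,
        PySem.List.pyRange_neg_one_eq_nil (by omega : low ≤ -1),
        interleave_nil_right]
    have := walkA_eq size low (up + 1)
    rw [PySem.List.pyRange_neg_one_eq_nil (by omega : low ≤ -1), interleave_nil_right] at this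
    simp [this]
  · simp only [hu, hl, or_true, if_true, if_false]
    rw [PySem.List.pyRange_one_eq_nil (by omega : size ≤ up),
        PySem.List.pyRange_neg_one_cons (by omega : (-1:Int) < low)]
    have := walkA_eq size (low - 1) up
    rw [PySem.List.pyRange_one_eq_nil (by omega : size ≤ up)] at this
    simp [interleave, this]
  · simp only [hu, hl]
    rw [PySem.List.pyRange_one_eq_nil (by omega : size ≤ up),
        PySem.List.pyRange_neg_one_eq_nil (by omega : low ≤ -1)]
    simp [interleave]
termination_by ((size - up).toNat + (low + 1).toNat)
decreasing_by all_goals omega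


-- every later element of the interleaving has key at least 2*(u-m)-1
theorem interleave_key_bound (size m u l : Int) (hinv : u + l = 2 * m) (hu : m < u)
    (z : Int) (hz : z ∈ interleave (PySem.List.pyRange u size 1) (PySem.List.pyRange l (-1) (-1))) :
    2 * (u - m) - 1 ≤ wkey m z := by
  rw [mem_interleave] at hz
  rcases hz with h | h
  · rw [PySem.List.mem_pyRange_one] at h
    have hzm : m < z := by omega
    simp only [wkey, abs_of_pos (by omega : (0:Int) < z - m), if_pos hzm]
    omega
  · rw [PySem.List.mem_pyRange_neg_one] at h
    have hzm : z < m := by omega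
    simp only [wkey, abs_of_neg (by omega : z - m < 0), if_neg (by omega : ¬ m < z)]
    omega

theorem interleave_pairwise (size m u l : Int) (hinv : u + l = 2 * m) (hu : m < u) :
    (interleave (PySem.List.pyRange u size 1) (PySem.List.pyRange l (-1) (-1))).Pairwise
      (fun a b => wkey m a < wkey m b) := by
  by_cases h1 : u < size <;> by_cases h2 : (0:Int) ≤ l
  · rw [PySem.List.pyRange_one_cons h1, PySem.List.pyRange_neg_one_cons (by omega : (-1:Int) < l)]
    have ih := interleave_pairwise size m (u + 1) (l - 1) (by omega) (by omega)
    have bd := interleave_key_bound size m (u + 1) (l - 1) (by omega) (by omega)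
    have ku : wkey m u = 2 * (u - m) - 1 := by
      simp only [wkey, abs_of_pos (by omega : (0:Int) < u - m), if_pos hu]
    have kl : wkey m l = 2 * (u - m) := by
      simp [wkey, abs_of_neg (by omega : l - m < 0), if_neg (by omega : ¬ m < l)]; omega
    simp only [interleave, List.pairwise_cons]
    refine ⟨?_, ?_, ih⟩
    · intro b hb
      rcases List.mem_cons.mp hb with rfl | hb
      · omega
      · have := bd b hb; omega
    · intro b hb
      have := bd b hb; omega
  · rw [PySem.List.pyRange_neg_one_eq_nil (by omega : l ≤ -1), interleave_nil_right]
    refine (PySem.List.pairwise_lt_pyRange_one u size).imp_of_mem ?_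
    intro a b ha hb hab
    rw [PySem.List.mem_pyRange_one] at ha hb
    simp only [wkey, abs_of_pos (by omega : (0:Int) < a - m), abs_of_pos (by omega : (0:Int) < b - m),
      if_pos (by omega : m < a), if_pos (by omega : m < b)]
    omega
  · rw [PySem.List.pyRange_one_eq_nil (by omega : size ≤ u)]
    simp only [interleave]
    rw [PySem.List.pyRange_neg_one_eq_reverse]
    rw [List.pairwise_reverse]
    refine (PySem.List.pairwise_lt_pyRange_one 0 (l + 1)).imp_of_mem ?_
    intro a b ha hb hab
    rw [PySem.List.mem_pyRange_one] at ha hb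
    simp only [wkey, abs_of_neg (by omega : a - m < 0), abs_of_neg (by omega : b - m < 0),
      if_neg (by omega : ¬ m < a), if_neg (by omega : ¬ m < b)]
    omega
  · rw [PySem.List.pyRange_one_eq_nil (by omega : size ≤ u),
        PySem.List.pyRange_neg_one_eq_nil (by omega : l ≤ -1)]
    simp [interleave]
termination_by ((size - u).toNat + (l + 1).toNat)
decreasing_by all_goals omega

-- the non-middle indices of range(size), split at the middle
theorem filter_range_split (m size : Int) (h0 : 0 <= m) (h1 : m < size) :
    (PySem.List.pyRange 0 size 1).filter (fun i => i != m)
      = PySem.List.pyRange 0 m 1 ++ PySem.List.pyRange (m + 1) size 1 := by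
  rw [PySem.List.pyRange_one_append 0 m size h0 (by omega),
      PySem.List.pyRange_one_cons h1]
  rw [List.filter_append, List.filter_cons]
  simp only [bne_self_eq_false, Bool.false_eq_true, if_false]
  rw [List.filter_eq_self.mpr, List.filter_eq_self.mpr]
  · intro a ha; rw [PySem.List.mem_pyRange_one] at ha; simp; omega
  · intro a ha; rw [PySem.List.mem_pyRange_one] at ha; simp; omega

theorem interleave_perm_filter (m size : Int) (hm : m = size / 2) :
    (interleave (PySem.List.pyRange (m + 1) size 1) (PySem.List.pyRange (m - 1) (-1) (-1))).Perm
      ((PySem.List.pyRange 0 size 1).filter (fun i => i != m)) := by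
  refine (interleave_perm_append _ _).trans ?_
  by_cases hs : 0 < size
  · rw [filter_range_split m size (by omega) (by omega)]
    have hrev : PySem.List.pyRange (m - 1) (-1) (-1) = (PySem.List.pyRange 0 m 1).reverse := by
      have := PySem.List.pyRange_neg_one_eq_reverse (m - 1) (-1)
      simpa using this
    rw [hrev]
    exact ((List.Perm.append_left _ (List.reverse_perm _))).trans List.perm_append_comm
  · rw [PySem.List.pyRange_one_eq_nil (by omega : size ≤ m + 1),
        PySem.List.pyRange_neg_one_eq_nil (by omega : m - 1 ≤ -1),
        PySem.List.pyRange_one_eq_nil (by omega : size ≤ (0:Int))]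
    simp

-- ===== VERDICT (by name: the statement is the Claim_ definition above) =====
theorem right_left_walk_spec : Claim_equal_right_left_walk := by
  intro size _
  unfold Spec_right_left_walk right_left_walk right_left_walk_alt
  simp only []
  set m := PySem.Int.floordiv size 2 with hmdef
  have hm : m = size / 2 := by
    rw [hmdef, PySem.Int.floordiv_eq_ediv_of_pos (by omega)]
  rw [walkA_eq]
  congr 1
  have hkey : (fun i => 2 * |i - m| - (if m < i then 1 else 0)) = wkey m := rfl
  rw [hkey]
  exact (PySem.List.sorted_eq_of_perm_of_pairwise_lt _ _ (wkey m)
    (interleave_perm_filter m size hm)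
    (interleave_pairwise size m (m + 1) (m - 1) (by omega) (by omega))).symm
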